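-- pv_equiv track=rewrite | github.com/chenzongyao200127/leetcode_in_rust | src/600_不含连续1的非负整数.py | findIntegers
-- ===== SOURCE A (Python) =====
-- def findIntegers(n: int) -> int:
--     bin_n = bin(n)[2:]
--     k = len(bin_n)
--
--     # 初始化 dp 数组
--     dp = [0] * (k + 1)
--     dp[0] = 1
--     dp[1] = 2
--
--     # 根据递推关系填充 dp 数组
--     for i in range(2, k):
--         dp[i] = dp[i-1] + dp[i-2]
--
--     ans, prev_bit = 0, 0
--
--     for i in range(k):
--         curr_bit = int(bin_n[i])
--         if curr_bit == 1:
--             ans += dp[k-i-1]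
--             if prev_bit == 1:
--                 return ans
--         prev_bit = curr_bit
--
--     return ans + 1
-- ===== SOURCE B (Python) =====
-- def findIntegers(n: int) -> int:
--     # scan n's bits from least to most significant; c0/c1 count the x <= (n mod 2^k)
--     # whose top processed bit is 0/1, f0/f1 count the free k-bit values likewise
--     c0, c1 = 1, 0
--     f0, f1 = 1, 0
--     m = n
--     while m > 0:
--         if m & 1:
--             c0, c1 = f0 + f1, c0
--         else:
--             c0, c1 = c0 + c1, 0
--         f0, f1 = f0 + f1, f0
--         m >>= 1
--     return c0 + c1
-- ===== Notes on version B (the rewrite author's own statement) =====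
-- stated objective: alternative
-- what changed: Replaces A's MSB digit-DP (builds the bin(n) string, precomputes a Fibonacci dp table, scans the bits most-significant-first with an early return on consecutive ones) by a single least-significant-first pass over n itself that keeps four scalar counters (counts of admissible values below the processed suffix with top processed bit 0/1, and of free bit-strings likewise) and never materialises the binary string or a table.
import Mathlib
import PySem

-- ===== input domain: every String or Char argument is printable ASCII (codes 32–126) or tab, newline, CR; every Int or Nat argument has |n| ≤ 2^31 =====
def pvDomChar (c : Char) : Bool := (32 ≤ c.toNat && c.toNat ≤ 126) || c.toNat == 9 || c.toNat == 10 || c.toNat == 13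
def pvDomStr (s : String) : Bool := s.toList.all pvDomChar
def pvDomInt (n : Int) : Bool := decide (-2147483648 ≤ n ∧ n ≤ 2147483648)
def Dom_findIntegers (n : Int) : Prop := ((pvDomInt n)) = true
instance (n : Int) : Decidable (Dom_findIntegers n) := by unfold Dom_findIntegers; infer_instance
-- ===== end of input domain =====

-- B replaces A's MSB scan (bin(n) string + precomputed Fibonacci dp table + early return) by a
-- single LSB-to-MSB pass over n itself with four scalar counters (objective: alternative).

-- ===== PORT A =====

-- dp = [0]*(k+1); dp[0] = 1; dp[1] = 2; for i in range(2, k): dp[i] = dp[i-1] + dp[i-2]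
-- (range(2, k) visits the naturals 2, …, k-1, here List.range' 2 (k-2))
def buildDp (k : Nat) : List Int :=
  (List.range' 2 (k - 2)).foldl
    (fun dp i => dp.set i (dp.getD (i - 1) 0 + dp.getD (i - 2) 0))
    (((List.replicate (k + 1) (0 : Int)).set 0 1).set 1 2)

-- for i in range(k): curr_bit = int(bin_n[i]); if curr_bit == 1: ans += dp[k-i-1];
--   if prev_bit == 1: return ans;  prev_bit = curr_bit
-- (int(bin_n[i]) via PySem.Int.ofChars?; on the '0'/'1' digits of bin(n) for n ≥ 0 it is always
--  `some`, so .getD 0 never supplies a default inside Pre_; for n < 0 Python raises ValueError)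
def aLoop (dp : List Int) (k : Nat) : List Char → Nat → Int → Int → Int
  | [], _, ans, _ => ans + 1
  | c :: rest, i, ans, prev =>
    let curr : Int := (PySem.Int.ofChars? [c]).getD 0
    if curr = 1 then
      let ans' := ans + dp.getD (k - i - 1) 0
      if prev = 1 then ans'
      else aLoop dp k rest (i + 1) ans' curr
    else aLoop dp k rest (i + 1) ans curr

-- bin_n = bin(n)[2:]  (for n ≥ 0 this is format(n,'b') = PySem.Int.toBinChars n; n < 0 raises later)
def findIntegers (n : Int) : Int :=
  let binN : List Char := PySem.Int.toBinChars n
  let k : Nat := binN.length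
  let dp : List Int := buildDp k
  aLoop dp k binN 0 0 0

-- ===== PORT B =====

-- while m > 0: if m & 1: c0, c1 = f0+f1, c0 else: c0, c1 = c0+c1, 0; f0, f1 = f0+f1, f0; m >>= 1
-- (the simultaneous assignment is rendered as two ifs over the same pre-state)
def altLoop (m c0 c1 f0 f1 : Int) : Int :=
  if _h : 0 < m then
    altLoop (m >>> (1 : Nat))
      (if PySem.Int.band m 1 ≠ 0 then f0 + f1 else c0 + c1)
      (if PySem.Int.band m 1 ≠ 0 then c0 else 0)
      (f0 + f1) f0
  else c0 + c1
termination_by m.toNat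
decreasing_by
  have h1 : ((m.toNat : Int)) = m := Int.toNat_of_nonneg (le_of_lt _h)
  rw [← h1, ← Int.natCast_shiftRight]
  simp only [Int.toNat_natCast]
  have h2 : m.toNat >>> 1 = m.toNat / 2 := by
    simp [Nat.shiftRight_succ, Nat.shiftRight_zero]
  rw [h2]
  omega

-- c0, c1 = 1, 0; f0, f1 = 1, 0; m = n; <loop>; return c0 + c1
def findIntegers_alt (n : Int) : Int := altLoop n 1 0 1 0

-- ===== PRECONDITION & SPEC =====

-- Pre_ excludes only n < 0, where Python A raises ValueError (int('b') on bin(n)[2:] = 'b…').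
def Pre_findIntegers (n : Int) : Prop := 0 ≤ n
instance (n : Int) : Decidable (Pre_findIntegers n) := by unfold Pre_findIntegers; infer_instance
def pvWitness_findIntegers : Int := 5

def Spec_findIntegers (n : Int) (out : Int) : Prop := out = findIntegers_alt n
instance (n : Int) (out : Int) : Decidable (Spec_findIntegers n out) := by unfold Spec_findIntegers; infer_instance

-- ===== CLAIM (what is proved, stated in full; the proofs are below) =====
def Claim_equal_findIntegers : Prop := ∀ (n : Int), Dom_findIntegers n → Pre_findIntegers n → Spec_findIntegers n (findIntegers n)

-- ===== LEMMAS AND PROOFS =====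

-- F k = number of length-k bit strings with no two adjacent 1s (the values of A's dp table)
def pvF : Nat → Nat
  | 0 => 1
  | 1 => 2
  | (m + 2) => pvF (m + 1) + pvF m

-- "no two consecutive ones in binary", B's test on the Nat side
def pvGood (y : Nat) : Bool := y &&& (y >>> 1) == 0

def pvBitChar (b : Bool) : Char := if b then '1' else '0'

-- binary digits of n > 0, MSB first ([] for 0)
def pvBitsPos : Nat → List Bool
  | 0 => []
  | (n + 1) => pvBitsPos ((n + 1) / 2) ++ [decide ((n + 1) % 2 = 1)]
decreasing_by exact Nat.div_lt_self (Nat.succ_pos n) (by omega)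

-- the characters of format(n, 'b')
def pvCharBits (n : Nat) : List Char := if n = 0 then ['0'] else (pvBitsPos n).map pvBitChar

def pvNatBits (n : Nat) : List Bool := if n = 0 then [false] else pvBitsPos n

-- n's binary written on exactly m digits (n < 2^m), MSB first
def pvPadBits : Nat → Nat → List Bool
  | 0, _ => []
  | (m + 1), r => decide (2 ^ m ≤ r) :: pvPadBits m (if 2 ^ m ≤ r then r - 2 ^ m else r)

-- the value of A's scanning loop as a recursion on the bit list
def pvLoopSem : Bool → List Bool → Nat
  | _, [] => 1
  | prev, b :: bs => if b then pvF bs.length + (if prev then 0 else pvLoopSem true bs) else pvLoopSem false bs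

-- what pvLoopSem prev (pvPadBits m r) counts: y ≤ r, good, and (when prev) top padded digit 0
def pvCond (prev : Bool) (m : Nat) (y : Nat) : Bool :=
  pvGood y && (!prev || decide (y < 2 ^ (m - 1)))

lemma pvBitsPos_pos (r : Nat) (hr : r ≠ 0) :
    pvBitsPos r = pvBitsPos (r / 2) ++ [decide (r % 2 = 1)] := by
  obtain ⟨t, rfl⟩ := Nat.exists_eq_succ_of_ne_zero hr
  rw [pvBitsPos]

lemma pvCharBits_eq (n : Nat) : pvCharBits n = (pvNatBits n).map pvBitChar := by
  by_cases h : n = 0 <;> simp [pvCharBits, pvNatBits, h, pvBitChar]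

lemma toDigitsCore_eq (fuel : Nat) : ∀ (n : Nat) (ds : List Char), 0 < fuel → n < 2 ^ fuel →
    Nat.toDigitsCore 2 fuel n ds = pvCharBits n ++ ds := by
  induction fuel with
  | zero => intro n ds h _; omega
  | succ f ih =>
    intro n ds _ h
    rw [Nat.toDigitsCore]
    by_cases h2 : n / 2 = 0
    · have : n < 2 := by omega
      interval_cases n <;> simp [pvCharBits, pvBitsPos, pvBitChar] <;> decide
    · simp only [h2]
      have hf : 0 < f := by
        rcases Nat.eq_zero_or_pos f with rfl | hf
        · omega
        · exact hf
      have hdiv : n / 2 < 2 ^ f := by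
        have hpow : 2 ^ f * 2 = 2 ^ (f + 1) := by ring
        omega
      rw [ih (n / 2) _ hf hdiv]
      have hn : n ≠ 0 := by omega
      have hrec : pvCharBits n = pvCharBits (n / 2) ++ [Nat.digitChar (n % 2)] := by
        simp only [pvCharBits, if_neg hn, if_neg h2]
        rw [pvBitsPos_pos n hn, List.map_append]
        congr 1
        rcases Nat.mod_two_eq_zero_or_one n with h0 | h1
        · simp [h0, pvBitChar, Nat.digitChar]
        · simp [h1, pvBitChar, Nat.digitChar]
      rw [hrec, List.append_assoc]
      rfl

lemma toBinChars_eq (r : Nat) : PySem.Int.toBinChars (r : Int) = pvCharBits r := by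
  have h1 : ¬ ((r : Int) < 0) := by omega
  simp only [PySem.Int.toBinChars, if_neg h1, Int.toNat_natCast]
  show Nat.toDigitsCore 2 (r + 1) r [] = pvCharBits r
  rw [toDigitsCore_eq (r + 1) r [] (by omega) (by
    have h2 : r < 2 ^ r := Nat.lt_two_pow_self
    have h3 : (2:Nat) ^ r ≤ 2 ^ (r + 1) := Nat.pow_le_pow_right (by omega) (by omega)
    omega)]
  simp

lemma getD_F_append (k i : Nat) (t : List Int) (h : i < k) :
    (((List.range k).map (fun j => (pvF j : Int))) ++ t).getD i 0 = (pvF i : Int) := by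
  rw [List.getD_eq_getElem?_getD, List.getElem?_append_left (by simpa using h),
    List.getElem?_map, List.getElem?_range h]
  rfl

lemma dpFold (k : Nat) (hk : 2 ≤ k) : ∀ j, j ≤ k - 2 →
    (List.range' 2 j).foldl
      (fun dp i => dp.set i (dp.getD (i - 1) 0 + dp.getD (i - 2) 0))
      (((List.replicate (k + 1) (0 : Int)).set 0 1).set 1 2)
    = ((List.range (j + 2)).map (fun i => (pvF i : Int))) ++ List.replicate (k - 1 - j) (0 : Int) := by
  intro j
  induction j with
  | zero =>
    intro _
    have e : k + 1 = (k - 1) + 1 + 1 := by omega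
    rw [e, List.replicate_succ, List.replicate_succ]
    simp [List.range_succ, pvF]
  | succ j ih =>
    intro hj
    rw [List.range'_concat, List.foldl_append, ih (by omega)]
    simp only [List.foldl_cons, List.foldl_nil]
    have e1 : 2 + 1 * j = j + 2 := by omega
    rw [e1]
    have e2 : j + 2 - 1 = j + 1 := by omega
    have e3 : j + 2 - 2 = j := by omega
    rw [e2, e3, getD_F_append (j + 2) (j + 1) _ (by omega), getD_F_append (j + 2) j _ (by omega)]
    rw [List.set_append_right _ _ (by simp)]
    have e4 : j + 2 - ((List.range (j + 2)).map (fun i => (pvF i : Int))).length = 0 := by simp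
    rw [e4]
    have e5 : k - 1 - j = (k - 1 - (j + 1)) + 1 := by omega
    rw [e5, List.replicate_succ, List.set_cons_zero]
    have e6 : (pvF (j + 1) : Int) + (pvF j : Int) = ((pvF (j + 2) : Nat) : Int) := by
      show _ = ((pvF (j + 1) + pvF j : Nat) : Int)
      push_cast
      ring
    rw [e6]
    simp [List.range_succ]

lemma dp_spec (k : Nat) (i : Nat) (h : i < k) : (buildDp k).getD i 0 = (pvF i : Int) := by
  by_cases h2 : 2 ≤ k
  · unfold buildDp
    rw [dpFold k h2 (k - 2) le_rfl, show k - 2 + 2 = k from by omega]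
    exact getD_F_append k i _ h
  · have hk1 : k = 1 := by omega
    subst hk1
    have hi : i = 0 := by omega
    subst hi
    decide

lemma aLoop_eq (dp : List Int) (k : Nat) (hdp : ∀ j, j < k → dp.getD j 0 = (pvF j : Int)) :
    ∀ (bs : List Bool) (i : Nat) (ans : Int) (prev : Bool), i + bs.length = k →
    aLoop dp k (bs.map pvBitChar) i ans (if prev then 1 else 0) = ans + (pvLoopSem prev bs : Int) := by
  intro bs
  induction bs with
  | nil => intro i ans prev h; simp [aLoop, pvLoopSem]
  | cons b bs ih =>
    intro i ans prev h
    have hk : i + 1 + bs.length = k := by simp at h; omega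
    have hcur : (PySem.Int.ofChars? [pvBitChar b]).getD 0 = (if b then (1 : Int) else 0) := by
      cases b <;> decide
    cases b
    · -- bit 0: continue with prev_bit = 0
      show aLoop dp k (pvBitChar false :: bs.map pvBitChar) i ans (if prev then 1 else 0)
        = ans + (pvLoopSem prev (false :: bs) : Int)
      rw [aLoop]
      simp only [hcur]
      norm_num
      have h0 := ih (i + 1) ans false hk
      norm_num at h0
      rw [h0, show pvLoopSem prev (false :: bs) = pvLoopSem false bs from by cases prev <;> rfl]
    · -- bit 1
      show aLoop dp k (pvBitChar true :: bs.map pvBitChar) i ans (if prev then 1 else 0)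
        = ans + (pvLoopSem prev (true :: bs) : Int)
      rw [aLoop]
      simp only [hcur]
      norm_num
      have hidx : k - i - 1 = bs.length := by simp at h; omega
      have hdpv : dp.getD (k - i - 1) 0 = (pvF bs.length : Int) := by
        rw [hidx]; exact hdp bs.length (by omega)
      simp only [List.getD_eq_getElem?_getD] at hdpv
      cases prev
      · -- prev_bit = 0: keep scanning with prev_bit = 1
        rw [if_neg (by norm_num)]
        have h1 := ih (i + 1) (ans + dp.getD (k - i - 1) 0) true hk
        norm_num at h1
        rw [h1, hdpv,
          show pvLoopSem false (true :: bs) = pvF bs.length + pvLoopSem true bs from by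
            simp [pvLoopSem]]
        push_cast
        ring
      · -- prev_bit = 1: early return
        rw [if_pos (by norm_num), hdpv,
          show pvLoopSem true (true :: bs) = pvF bs.length from by simp [pvLoopSem]]

lemma pvPadBits_length (m : Nat) : ∀ r, (pvPadBits m r).length = m := by
  induction m with
  | zero => intro r; rfl
  | succ m ih => intro r; simp [pvPadBits, ih]

lemma pvPadBits_div2 (m : Nat) : ∀ r, r < 2 ^ (m + 1) →
    pvPadBits (m + 1) r = pvPadBits m (r / 2) ++ [decide (r % 2 = 1)] := by
  induction m with
  | zero =>
    intro r h
    interval_cases r <;> decide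
  | succ m ih =>
    intro r h
    have hp : (2:Nat) ^ (m + 1) = 2 ^ m * 2 := by ring
    have hp2 : (2:Nat) ^ (m + 2) = 2 ^ (m + 1) * 2 := by ring
    have hhead : (2 ^ (m + 1) ≤ r) ↔ (2 ^ m ≤ r / 2) := by
      rw [Nat.le_div_iff_mul_le (by omega : 0 < 2)]
      omega
    show decide (2 ^ (m + 1) ≤ r) :: pvPadBits (m + 1) (if 2 ^ (m + 1) ≤ r then r - 2 ^ (m + 1) else r)
      = (decide (2 ^ m ≤ r / 2) :: pvPadBits m (if 2 ^ m ≤ r / 2 then r / 2 - 2 ^ m else r / 2)) ++ [decide (r % 2 = 1)]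
    rw [List.cons_append]
    by_cases hb : 2 ^ (m + 1) ≤ r
    · have hb2 : 2 ^ m ≤ r / 2 := hhead.mp hb
      rw [if_pos hb, if_pos hb2]
      congr 1
      · simp [hb, hb2]
      · rw [ih (r - 2 ^ (m + 1)) (by omega)]
        have e1 : (r - 2 ^ (m + 1)) / 2 = r / 2 - 2 ^ m := by omega
        have e2 : (r - 2 ^ (m + 1)) % 2 = r % 2 := by omega
        rw [e1, e2]
    · have hb2 : ¬ (2 ^ m ≤ r / 2) := fun hc => hb (hhead.mpr hc)
      rw [if_neg hb, if_neg hb2]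
      congr 1
      · simp [hb, hb2]
      · rw [ih r (by omega)]

lemma pvPadBits_msb (m : Nat) : ∀ r, 2 ^ m ≤ r → r < 2 ^ (m + 1) → pvPadBits (m + 1) r = pvBitsPos r := by
  induction m with
  | zero =>
    intro r h1 h2
    have : r = 1 := by omega
    subst this
    have h0 : pvBitsPos 0 = [] := by simp [pvBitsPos]
    rw [pvBitsPos_pos 1 (by omega), h0]
    decide
  | succ m ih =>
    intro r h1 h2
    rw [pvPadBits_div2 (m + 1) r h2]
    have hd1 : 2 ^ m ≤ r / 2 := by
      rw [Nat.le_div_iff_mul_le (by omega : 0 < 2)]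
      have : (2:Nat) ^ (m + 1) = 2 ^ m * 2 := by ring
      omega
    have hd2 : r / 2 < 2 ^ (m + 1) := by
      rw [Nat.div_lt_iff_lt_mul (by omega : 0 < 2)]
      have : (2:Nat) ^ (m + 2) = 2 ^ (m + 1) * 2 := by ring
      omega
    rw [ih (r / 2) hd1 hd2]
    rw [pvBitsPos_pos r (by have : (0:Nat) < 2 ^ (m+1) := Nat.two_pow_pos _; omega)]

lemma pvLoopSem_pad (m : Nat) : ∀ r, r < 2 ^ m → pvLoopSem false (pvPadBits m r) = pvLoopSem false (pvNatBits r) := by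
  induction m with
  | zero =>
    intro r h
    have : r = 0 := by omega
    subst this
    decide
  | succ m ih =>
    intro r h
    by_cases hb : 2 ^ m ≤ r
    · rw [pvPadBits_msb m r hb h]
      have hr : r ≠ 0 := by have : (0:Nat) < 2 ^ m := Nat.two_pow_pos _; omega
      simp [pvNatBits, hr]
    · have : pvPadBits (m + 1) r = false :: pvPadBits m r := by
        simp [pvPadBits, hb]
      rw [this]
      show pvLoopSem false (false :: pvPadBits m r) = _
      rw [show pvLoopSem false (false :: pvPadBits m r) = pvLoopSem false (pvPadBits m r) from by simp [pvLoopSem]]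
      exact ih r (by omega)

lemma pvGood_iff (y : Nat) : pvGood y = true ↔ ∀ i, ¬(y.testBit i = true ∧ y.testBit (i + 1) = true) := by
  unfold pvGood
  rw [beq_iff_eq]
  constructor
  · intro h i hi
    have h2 : (y &&& (y >>> 1)).testBit i = false := by rw [h]; exact Nat.zero_testBit i
    rw [Nat.testBit_and, Nat.testBit_shiftRight] at h2
    rw [Nat.add_comm 1 i] at h2
    rw [hi.1, hi.2] at h2
    simp at h2
  · intro h
    apply Nat.eq_of_testBit_eq
    intro i
    rw [Nat.testBit_and, Nat.testBit_shiftRight, Nat.zero_testBit, Nat.add_comm 1 i]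
    have := h i
    cases h1 : y.testBit i <;> cases h2 : y.testBit (i + 1) <;> simp_all

lemma testBit_high (z j m : Nat) (hz : z < 2 ^ m) (hj : m ≤ j) : z.testBit j = false :=
  Nat.testBit_lt_two_pow (lt_of_lt_of_le hz (Nat.pow_le_pow_right (by omega) hj))

lemma testBit_mid (z m : Nat) (hz : z < 2 ^ (m + 1)) : z.testBit m = true ↔ 2 ^ m ≤ z := by
  constructor
  · intro h
    by_contra hc
    have hlt : z < 2 ^ m := by omega
    rw [Nat.testBit_lt_two_pow hlt] at h
    exact Bool.false_ne_true h
  · intro h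
    have e : z = 2 ^ m + (z - 2 ^ m) := by omega
    rw [e, Nat.testBit_two_pow_add_eq, Nat.testBit_lt_two_pow (by omega : z - 2 ^ m < 2 ^ m)]
    rfl

lemma testBit_add_pow (z m j : Nat) (hz : z < 2 ^ m) (hj : j ≠ m) : (2 ^ m + z).testBit j = z.testBit j := by
  rcases Nat.lt_or_ge j m with hlt | hge
  · exact Nat.testBit_two_pow_add_gt hlt z
  · have hgt : m < j := by omega
    have h1 : (2 ^ m + z).testBit j = false := by
      apply Nat.testBit_lt_two_pow
      have e : (2:Nat) ^ (m + 1) = 2 ^ m + 2 ^ m := by ring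
      have h2 : 2 ^ m + z < 2 ^ (m + 1) := by omega
      have h3 : (2:Nat) ^ (m + 1) ≤ 2 ^ j := Nat.pow_le_pow_right (by omega) (by omega)
      omega
    rw [h1, testBit_high z j m hz (by omega)]

lemma pvGood_split (m z : Nat) (hz : z < 2 ^ m) :
    pvGood (2 ^ m + z) = (pvGood z && decide (z < 2 ^ (m - 1))) := by
  rcases Nat.eq_zero_or_pos m with hm0 | hm
  · subst hm0
    have : z = 0 := by omega
    subst this
    decide
  · obtain ⟨m', rfl⟩ : ∃ m', m = m' + 1 := ⟨m - 1, by omega⟩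
    simp only [Nat.add_sub_cancel]
    have hself : (2 ^ (m' + 1) + z).testBit (m' + 1) = true := by
      rw [Nat.testBit_two_pow_add_eq, testBit_high z (m' + 1) (m' + 1) hz le_rfl]
      rfl
    rw [Bool.eq_iff_iff, Bool.and_eq_true, decide_eq_true_iff, pvGood_iff, pvGood_iff]
    constructor
    · intro h
      refine ⟨?_, ?_⟩
      · intro i hi
        rcases Nat.lt_or_ge (i + 1) (m' + 1) with hlt | hge
        · exact h i ⟨by rw [testBit_add_pow z (m' + 1) i hz (by omega)]; exact hi.1,
            by rw [testBit_add_pow z (m' + 1) (i + 1) hz (by omega)]; exact hi.2⟩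
        · rcases Nat.lt_or_ge i (m' + 1) with h2 | h2
          · have : i + 1 = m' + 1 := by omega
            have hzb : z.testBit (i + 1) = false := by
              rw [this]; exact testBit_high z (m' + 1) (m' + 1) hz le_rfl
            rw [hzb] at hi
            exact Bool.false_ne_true hi.2
          · have hzb : z.testBit i = false := testBit_high z i (m' + 1) hz h2
            rw [hzb] at hi
            exact Bool.false_ne_true hi.1
      · by_contra hc
        have hge : 2 ^ m' ≤ z := by omega
        
        have hzm : z.testBit m' = true := (testBit_mid z m' (by
          have : (2:Nat) ^ (m' + 1) = 2 ^ m' + 2 ^ m' := by ring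
          omega)).mpr hge
        exact h m' ⟨by rw [testBit_add_pow z (m' + 1) m' hz (by omega)]; exact hzm, hself⟩
    · rintro ⟨hg, hlt⟩ i hi
      rcases Nat.lt_or_ge (i + 1) (m' + 1) with h2 | h2
      · refine hg i ⟨?_, ?_⟩
        · rw [← testBit_add_pow z (m' + 1) i hz (by omega)]; exact hi.1
        · rw [← testBit_add_pow z (m' + 1) (i + 1) hz (by omega)]; exact hi.2
      · rcases Nat.eq_or_lt_of_le h2 with h3 | h3
        · -- i + 1 = m' + 1, so i = m': z.testBit m' must be true, contradiction with z < 2^m'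
          have hi' : i = m' := by omega
          have : (2 ^ (m' + 1) + z).testBit i = z.testBit i :=
            testBit_add_pow z (m' + 1) i hz (by omega)
          rw [this] at hi
          have : z.testBit m' = false := Nat.testBit_lt_two_pow (by simpa using hlt)
          rw [hi'] at hi
          rw [this] at hi
          exact Bool.false_ne_true hi.1
        · -- i ≥ m' + 1: if i = m' + 1, bit i+1 is z's = false; else bit i is z's = false
          rcases Nat.eq_or_lt_of_le h3 with h4 | h4
          · have : (2 ^ (m' + 1) + z).testBit (i + 1) = z.testBit (i + 1) :=
              testBit_add_pow z (m' + 1) (i + 1) hz (by omega)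
            rw [this, testBit_high z (i + 1) (m' + 1) hz (by omega)] at hi
            exact Bool.false_ne_true hi.2
          · have : (2 ^ (m' + 1) + z).testBit i = z.testBit i :=
              testBit_add_pow z (m' + 1) i hz (by omega)
            rw [this, testBit_high z i (m' + 1) hz (by omega)] at hi
            exact Bool.false_ne_true hi.1

lemma countGood_pow (m : Nat) : (List.range (2 ^ m)).countP pvGood = pvF m := by
  induction m using Nat.strong_induction_on with
  | _ m ih =>
    match m with
    | 0 => decide
    | 1 => decide
    | (m + 2) =>
      have e : (2:Nat) ^ (m + 2) = 2 ^ (m + 1) + 2 ^ (m + 1) := by ring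
      rw [e, List.range_add, List.countP_append, ih (m + 1) (by omega), List.countP_map]
      have step : List.countP (pvGood ∘ (fun x => 2 ^ (m + 1) + x)) (List.range (2 ^ (m + 1)))
          = List.countP (fun z => pvGood z && decide (z < 2 ^ m)) (List.range (2 ^ (m + 1))) := by
        apply List.countP_congr
        intro z hz
        have hz' : z < 2 ^ (m + 1) := List.mem_range.mp hz
        show (pvGood (2 ^ (m + 1) + z) = true) ↔ _
        rw [pvGood_split (m + 1) z hz']
        simp
      rw [step]
      have e2 : (2:Nat) ^ (m + 1) = 2 ^ m + 2 ^ m := by ring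
      rw [e2, List.range_add, List.countP_append, List.countP_map]
      have p1 : List.countP (fun z => pvGood z && decide (z < 2 ^ m)) (List.range (2 ^ m))
          = List.countP pvGood (List.range (2 ^ m)) := by
        apply List.countP_congr
        intro z hz
        have : z < 2 ^ m := List.mem_range.mp hz
        simp [this]
      have p2 : List.countP ((fun z => pvGood z && decide (z < 2 ^ m)) ∘ (fun x => 2 ^ m + x)) (List.range (2 ^ m)) = 0 := by
        rw [List.countP_eq_zero]
        intro z _
        have hlt : ¬ (2 ^ m + z < 2 ^ m) := by omega
        simp [Function.comp, hlt]
      rw [p1, p2, ih m (by omega)]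
      have hF : pvF (m + 2) = pvF (m + 1) + pvF m := rfl
      omega

lemma pvMain (m : Nat) : ∀ r, r < 2 ^ m → ∀ prev, pvLoopSem prev (pvPadBits m r) = (List.range (r + 1)).countP (pvCond prev m) := by
  induction m with
  | zero =>
    intro r h prev
    have : r = 0 := by omega
    subst this
    cases prev <;> decide
  | succ m ih =>
    intro r h prev
    by_cases hb : 2 ^ m ≤ r
    · -- top digit 1: r = 2^m + s
      have hpd : pvPadBits (m + 1) r = true :: pvPadBits m (r - 2 ^ m) := by
        simp [pvPadBits, hb]
      rw [hpd]
      show (if true then pvF (pvPadBits m (r - 2 ^ m)).length + (if prev then 0 else pvLoopSem true (pvPadBits m (r - 2 ^ m))) else pvLoopSem false (pvPadBits m (r - 2 ^ m))) = _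
      rw [if_pos rfl, pvPadBits_length m (r - 2 ^ m)]
      have hs : r - 2 ^ m < 2 ^ m := by
        have : (2:Nat) ^ (m + 1) = 2 ^ m + 2 ^ m := by ring
        omega
      rw [show r + 1 = 2 ^ m + (r - 2 ^ m + 1) from by omega, List.range_add,
        List.countP_append, List.countP_map]
      have p1 : List.countP (pvCond prev (m + 1)) (List.range (2 ^ m))
          = List.countP pvGood (List.range (2 ^ m)) := by
        apply List.countP_congr
        intro y hy
        have hy' : y < 2 ^ m := List.mem_range.mp hy
        simp only [pvCond]
        have : (m + 1) - 1 = m := by omega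
        rw [this]
        simp [hy']
      rw [p1, countGood_pow m]
      have p2 : ∀ z, z < 2 ^ m →
          (pvCond prev (m + 1) ∘ (fun x => 2 ^ m + x)) z = ((!prev) && pvCond true m z) := by
        intro z hz'
        simp only [pvCond, Function.comp]
        have e1 : (m + 1) - 1 = m := by omega
        rw [e1]
        have e2 : ¬ (2 ^ m + z < 2 ^ m) := by omega
        rw [pvGood_split m z hz']
        simp [e2]
        cases prev <;> cases hg : pvGood z <;> cases hd : decide (z < 2 ^ (m - 1)) <;> simp
      cases prev
      · -- prev = false: second part counts pvCond true m over range (s+1)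
        have p3 : List.countP (pvCond false (m + 1) ∘ (fun x => 2 ^ m + x)) (List.range (r - 2 ^ m + 1))
            = List.countP (pvCond true m) (List.range (r - 2 ^ m + 1)) := by
          apply List.countP_congr
          intro z hz
          have hz' : z < 2 ^ m := by
            have := List.mem_range.mp hz
            omega
          rw [p2 z hz']
          simp
        rw [p3, ← ih (r - 2 ^ m) (by omega) true]
        simp
      · -- prev = true: second part is 0 (early return)
        have p3 : List.countP (pvCond true (m + 1) ∘ (fun x => 2 ^ m + x)) (List.range (r - 2 ^ m + 1)) = 0 := by
          rw [List.countP_eq_zero]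
          intro z hz
          have hz' : z < 2 ^ m := by
            have := List.mem_range.mp hz
            omega
          rw [p2 z hz']
          simp
        rw [p3]
        simp
    · -- top digit 0
      have hpd : pvPadBits (m + 1) r = false :: pvPadBits m r := by
        simp [pvPadBits, hb]
      rw [hpd]
      show pvLoopSem prev (false :: pvPadBits m r) = _
      rw [show pvLoopSem prev (false :: pvPadBits m r) = pvLoopSem false (pvPadBits m r) from by
        cases prev <;> simp [pvLoopSem]]
      rw [ih r (by omega) false]
      apply List.countP_congr
      intro y hy
      have hy' : y < 2 ^ m := by
        have := List.mem_range.mp hy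
        omega
      simp only [pvCond]
      have e1 : (m + 1) - 1 = m := by omega
      rw [e1]
      simp [hy']

-- aCnt r = the answer for r; n1 k r = those x ≤ r that are good and fit k bits with top bit 0
def aCnt (r : Nat) : Nat := (List.range (r + 1)).countP pvGood
def n1 (k r : Nat) : Nat := (List.range (r + 1)).countP (pvCond true k)

-- f0 after k loop steps: the good k-bit strings with top bit 0 (1 when k = 0)
def pvFm1 : Nat → Nat
  | 0 => 1
  | (j + 1) => pvF j

lemma pvF_succ_split (k : Nat) : pvF (k + 1) = pvF k + pvFm1 k := by
  cases k <;> rfl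

lemma n1_of_lt (k r : Nat) (h : r < 2 ^ k) : n1 (k + 1) r = aCnt r := by
  unfold n1 aCnt
  apply List.countP_congr
  intro y hy
  have hy' : y < 2 ^ k := by
    have := List.mem_range.mp hy
    omega
  simp [pvCond, hy']

lemma aCnt_top (k r : Nat) (h : r < 2 ^ k) : aCnt (2 ^ k + r) = pvF k + n1 k r := by
  unfold aCnt n1
  rw [show 2 ^ k + r + 1 = 2 ^ k + (r + 1) from rfl, List.range_add, List.countP_append,
    countGood_pow k, List.countP_map]
  congr 1
  apply List.countP_congr
  intro z hz
  have hz' : z < 2 ^ k := by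
    have := List.mem_range.mp hz
    omega
  show (pvGood (2 ^ k + z) = true) ↔ _
  rw [pvGood_split k z hz']
  simp [pvCond]

lemma n1_top (k r : Nat) (_h : r < 2 ^ k) : n1 (k + 1) (2 ^ k + r) = pvF k := by
  unfold n1
  rw [show 2 ^ k + r + 1 = 2 ^ k + (r + 1) from rfl, List.range_add, List.countP_append,
    List.countP_map]
  have p1 : List.countP (pvCond true (k + 1)) (List.range (2 ^ k))
      = List.countP pvGood (List.range (2 ^ k)) := by
    apply List.countP_congr
    intro y hy
    have hy' : y < 2 ^ k := List.mem_range.mp hy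
    simp [pvCond, hy']
  have p2 : List.countP (pvCond true (k + 1) ∘ (fun x => 2 ^ k + x)) (List.range (r + 1)) = 0 := by
    rw [List.countP_eq_zero]
    intro z _
    simp [pvCond, Function.comp]
  rw [p1, p2, countGood_pow k]
  omega

lemma altLoop_eq (m : Nat) : ∀ (k r : Nat), r < 2 ^ k →
    altLoop (m : Int) (n1 k r : Nat) ((aCnt r : Nat) - (n1 k r : Nat)) (pvFm1 k : Nat)
      ((pvF k : Nat) - (pvFm1 k : Nat))
    = ((aCnt (m * 2 ^ k + r) : Nat) : Int) := by
  induction m using Nat.strong_induction_on with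
  | _ m ih =>
    intro k r hr
    by_cases hm : m = 0
    · subst hm
      rw [altLoop, dif_neg (show ¬ (0 : Int) < ((0 : Nat) : Int) by norm_num)]
      rw [show (0 : Nat) * 2 ^ k + r = r from by omega]
      ring
    · have hmpos : (0 : Int) < (m : Int) := by
        have : 0 < m := Nat.pos_of_ne_zero hm
        exact_mod_cast this
      rw [altLoop, dif_pos hmpos]
      have hband : PySem.Int.band (m : Int) 1 = ((m &&& 1 : Nat) : Int) := by
        exact_mod_cast PySem.Int.band_natCast m 1
      have hand : m &&& 1 = m % 2 := Nat.and_one_is_mod m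
      have hcond : (PySem.Int.band (m : Int) 1 ≠ 0) ↔ (m % 2 = 1) := by
        rw [hband, hand]
        omega
      have hshift : ((m : Int) >>> (1 : Nat)) = ((m / 2 : Nat) : Int) := by
        have hs : m >>> 1 = m / 2 := by simp [Nat.shiftRight_succ, Nat.shiftRight_zero]
        rw [← Int.natCast_shiftRight, hs]
      rw [hshift]
      have hpow : (2 : Nat) ^ (k + 1) = 2 ^ k * 2 := by ring
      have a1 : ((pvFm1 k : Nat) : Int) + (((pvF k : Nat) : Int) - ((pvFm1 k : Nat) : Int))
          = ((pvF k : Nat) : Int) := by ring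
      have e2 : ((pvFm1 (k + 1) : Nat) : Int) = ((pvF k : Nat) : Int) := rfl
      by_cases hb : m % 2 = 1
      · -- odd bit
        rw [if_pos (hcond.mpr hb), if_pos (hcond.mpr hb), a1]
        have hr' : 2 ^ k + r < 2 ^ (k + 1) := by omega
        have key := ih (m / 2) (by omega) (k + 1) (2 ^ k + r) hr'
        rw [n1_top k r hr, aCnt_top k r hr] at key
        have e1 : (((pvF k + n1 k r : Nat) : Int)) - ((pvF k : Nat) : Int) = ((n1 k r : Nat) : Int) := by
          push_cast
          ring
        rw [e1, e2] at key
        have e3 : ((pvF (k + 1) : Nat) : Int) - ((pvF k : Nat) : Int) = ((pvFm1 k : Nat) : Int) := by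
          rw [pvF_succ_split k]
          push_cast
          ring
        rw [e3] at key
        have hm2 : m = 2 * (m / 2) + 1 := by omega
        have e5 : m / 2 * 2 ^ (k + 1) + (2 ^ k + r) = m * 2 ^ k + r := by
          calc m / 2 * 2 ^ (k + 1) + (2 ^ k + r) = (2 * (m / 2) + 1) * 2 ^ k + r := by
                rw [hpow]; ring
            _ = m * 2 ^ k + r := by rw [← hm2]
        rw [e5] at key
        rw [key]
      · -- even bit
        rw [if_neg (fun hc => hb (hcond.mp hc)), if_neg (fun hc => hb (hcond.mp hc))]
        have hr' : r < 2 ^ (k + 1) := by omega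
        have key := ih (m / 2) (by omega) (k + 1) r hr'
        rw [n1_of_lt k r hr] at key
        have e1 : ((aCnt r : Nat) : Int) - ((aCnt r : Nat) : Int) = 0 := by ring
        rw [e1, e2] at key
        have e3 : ((pvF (k + 1) : Nat) : Int) - ((pvF k : Nat) : Int) = ((pvFm1 k : Nat) : Int) := by
          rw [pvF_succ_split k]
          push_cast
          ring
        rw [e3] at key
        have e4 : ((n1 k r : Nat) : Int) + (((aCnt r : Nat) : Int) - ((n1 k r : Nat) : Int))
            = ((aCnt r : Nat) : Int) := by ring
        have hm2 : m = 2 * (m / 2) := by omega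
        have e5 : m / 2 * 2 ^ (k + 1) + r = m * 2 ^ k + r := by
          calc m / 2 * 2 ^ (k + 1) + r = (2 * (m / 2)) * 2 ^ k + r := by rw [hpow]; ring
            _ = m * 2 ^ k + r := by rw [← hm2]
        rw [e5] at key
        rw [e4, a1, key]

lemma alt_eq (n : Int) (hn : 0 ≤ n) :
    findIntegers_alt n = ((List.range (n.toNat + 1)).countP pvGood : Nat) := by
  unfold findIntegers_alt
  have hcast : ((n.toNat : Int)) = n := Int.toNat_of_nonneg hn
  have key := altLoop_eq n.toNat 0 0 (by omega)
  rw [show n.toNat * 2 ^ 0 + 0 = n.toNat from by omega] at key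
  have h1 : n1 0 0 = 1 := by decide
  have h2 : aCnt 0 = 1 := by decide
  have h3 : pvFm1 0 = 1 := rfl
  have h4 : pvF 0 = 1 := rfl
  rw [h1, h2, h3, h4] at key
  simp only [Nat.cast_one] at key
  rw [show (1 : Int) - 1 = 0 from by norm_num] at key
  rw [hcast] at key
  exact key

lemma a_eq (n : Int) (hn : 0 ≤ n) :
    findIntegers n = ((List.range (n.toNat + 1)).countP pvGood : Nat) := by
  have hcast : ((n.toNat : Int)) = n := Int.toNat_of_nonneg hn
  show (let binN : List Char := PySem.Int.toBinChars n
        let k : Nat := binN.length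
        let dp : List Int := buildDp k
        aLoop dp k binN 0 0 0) = _
  simp only []
  rw [← hcast, toBinChars_eq n.toNat, pvCharBits_eq]
  have hlen : ((pvNatBits n.toNat).map pvBitChar).length = (pvNatBits n.toNat).length := by simp
  rw [hlen]
  have := aLoop_eq (buildDp (pvNatBits n.toNat).length) (pvNatBits n.toNat).length
    (fun j hj => dp_spec _ j hj) (pvNatBits n.toNat) 0 0 false (by omega)
  rw [show (if false then (1:Int) else 0) = 0 from rfl] at this
  rw [this, zero_add]
  congr 1
  rw [← pvLoopSem_pad n.toNat n.toNat Nat.lt_two_pow_self,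
    pvMain n.toNat n.toNat Nat.lt_two_pow_self false]
  apply List.countP_congr
  intro y _
  simp [pvCond]

-- ===== VERDICT (by name: the statement is the Claim_ definition above) =====
theorem findIntegers_spec : Claim_equal_findIntegers := by
  unfold Claim_equal_findIntegers
  intro n _ hpre
  unfold Spec_findIntegers
  rw [a_eq n hpre, alt_eq n hpre]
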